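-- pv_equiv track=rewrite | github.com/vektoririna/PROG-3 | ISR/theme4/ISR4.py | dictionary
-- ===== SOURCE A (Python) =====
-- def dictionary(lines):
--     """
--         Формирование словаря из файла
--     """
--     l = []
--     keys = []
--     s = 0
--     for line in lines:
--         d = {}
--         k = line.find('"')
--         line = line+","
--         for i in line:
--             begin = line.find(":", k)
--             if begin != -1:
--                 end = line.find(",", begin)
--                 if end != -1:
--                     key = line[k:begin].strip(",").strip('"')
--                     value = line[begin:end].strip(":").strip("}").strip('"').strip("]").strip("}").strip('"')
--                     d.update({key: value})
--                     if s == 0: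
--                         keys.append(key)
--                     k = end
--             else:
--                 k += 1
--         s += 1
--         l.append(d)
--     return l, keys
-- ===== SOURCE B (Python) =====
-- def _strip_key(seg):
--     return seg.strip(",").strip('"')
--
--
-- def _strip_value(seg):
--     return seg.strip(":").strip("}").strip('"').strip("]").strip("}").strip('"')
--
--
-- def dictionary(lines):
--     """Single char-by-char pass per line: a 2-state machine (key segment / value
--     segment) with a growing buffer replaces A's repeated string.find scans."""
--     dicts = []
--     first_keys = []
--     first = True
--     for line in lines:
--         s = line + ","
--         start = 0
--         for i, c in enumerate(line):
--             if c == '"':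
--                 start = i
--                 break
--         d = {}
--         ks = []
--         buf = ""
--         key = None  # None: inside a key segment; str: inside a value segment
--         for c in s[start:]:
--             if key is None:
--                 if c == ':':
--                     key = _strip_key(buf)
--                     buf = ":"
--                 else:
--                     buf += c
--             else:
--                 if c == ',':
--                     d[key] = _strip_value(buf)
--                     ks.append(key)
--                     key = None
--                     buf = ","
--                 else:
--                     buf += c
--         dicts.append(d)
--         if first:
--             first_keys = ks
--             first = False
--     return dicts, first_keys
-- ===== Notes on version B (the rewrite author's own statement) =====
-- stated objective: alternative
-- what changed: B replaces A's find-based parsing (a per-character loop that re-runs string.find(':')/find(',') and slices the line on every iteration) with a single left-to-right character pass per line: a two-state machine (key segment / value segment) that grows a buffer character by character and emits a stripped key or value when it meets the delimiter, collecting the first line's keys locally instead of threading A's line counter.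
import Mathlib
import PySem

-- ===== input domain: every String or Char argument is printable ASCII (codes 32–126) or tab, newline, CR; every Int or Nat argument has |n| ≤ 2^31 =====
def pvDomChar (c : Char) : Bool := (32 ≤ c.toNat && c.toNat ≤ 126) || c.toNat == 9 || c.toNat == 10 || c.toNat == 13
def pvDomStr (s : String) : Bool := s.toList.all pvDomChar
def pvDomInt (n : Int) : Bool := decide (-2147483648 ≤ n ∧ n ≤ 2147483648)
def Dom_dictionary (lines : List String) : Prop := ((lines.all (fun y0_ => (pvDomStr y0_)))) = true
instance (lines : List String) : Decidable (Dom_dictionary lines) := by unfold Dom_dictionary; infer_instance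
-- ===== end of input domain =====

-- B replaces A's repeated string.find scans (restarted on every character of a per-character
-- loop) by a single left-to-right character pass per line: a two-state machine (key segment /
-- value segment) with a growing buffer.  Alternative structure; no speed claim.

-- ===== PORT A =====
-- body of A's inner 'for i in line' loop: state (d, keys, k); sctr is A's line counter s
def pvAStep (line2 : String) (sctr : Int)
    (st : PySem.Dict String String × List String × Int) :
    PySem.Dict String String × List String × Int :=
  let d := st.1; let keys := st.2.1; let k := st.2.2
  let begin_ := PySem.Str.findFrom line2 ":" k
  if begin_ ≠ -1 then
    let end_ := PySem.Str.findFrom line2 "," begin_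
    if end_ ≠ -1 then
      let key := PySem.Str.stripChars (PySem.Str.stripChars (PySem.Str.slice line2 (some k) (some begin_)) ",") "\""
      let value := PySem.Str.stripChars (PySem.Str.stripChars (PySem.Str.stripChars (PySem.Str.stripChars (PySem.Str.stripChars (PySem.Str.stripChars (PySem.Str.slice line2 (some begin_) (some end_)) ":") "}") "\"") "]") "}") "\""
      (PySem.Dict.insert d key value, if sctr = 0 then keys ++ [key] else keys, end_)
    else (d, keys, k)
  else (d, keys, k + 1)

-- body of A's outer 'for line in lines' loop: state (l, keys, s)
def pvALineStep (st : List (List (String × String)) × List String × Int) (line : String) :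
    List (List (String × String)) × List String × Int :=
  let l := st.1; let keys := st.2.1; let s := st.2.2
  let d : PySem.Dict String String := PySem.Dict.empty
  let k : Int := PySem.Str.find line "\""
  let line2 := line ++ ","
  let r := line2.toList.foldl (fun st2 _ => pvAStep line2 s st2) (d, keys, k)
  (l ++ [r.1.items], r.2.1, s + 1)

def dictionary (lines : List String) : (List (List (String × String))) × List String :=
  let res := lines.foldl pvALineStep ([], [], 0)
  (res.1, res.2.1)

-- ===== PORT B =====
def pvStripKey (seg : String) : String :=
  PySem.Str.stripChars (PySem.Str.stripChars seg ",") "\""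

def pvStripValue (seg : String) : String :=
  PySem.Str.stripChars (PySem.Str.stripChars (PySem.Str.stripChars (PySem.Str.stripChars (PySem.Str.stripChars (PySem.Str.stripChars seg ":") "}") "\"") "]") "}") "\""

-- B's 'for i, c in enumerate(line): if c == '"': start = i; break' scan (start stays 0 if absent)
def pvFindQuote : List Char → Nat → Nat
  | [], _ => 0
  | c :: cs, i => if c = '"' then i else pvFindQuote cs (i + 1)

-- B's character step: state (d, ks, buf, key?); key? = none while inside a key segment
def pvBStep (st : PySem.Dict String String × List String × List Char × Option String)
    (c : Char) : PySem.Dict String String × List String × List Char × Option String :=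
  match st.2.2.2 with
  | none =>
      if c = ':' then (st.1, st.2.1, [':'], some (pvStripKey (String.ofList st.2.2.1)))
      else (st.1, st.2.1, st.2.2.1 ++ [c], none)
  | some key =>
      if c = ',' then
        (PySem.Dict.insert st.1 key (pvStripValue (String.ofList st.2.2.1)), st.2.1 ++ [key], [','], none)
      else (st.1, st.2.1, st.2.2.1 ++ [c], some key)

-- B's per-line pass over s[start:]
def pvParseLineB (line : String) : PySem.Dict String String × List String :=
  let s := (line ++ ",").toList
  let start := pvFindQuote line.toList 0
  let r := (s.drop start).foldl pvBStep (PySem.Dict.empty, [], [], none)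
  (r.1, r.2.1)

-- B's outer loop: state (dicts, first_keys, first)
def pvBLineStep (st : List (List (String × String)) × List String × Bool) (line : String) :
    List (List (String × String)) × List String × Bool :=
  let r := pvParseLineB line
  (st.1 ++ [r.1.items], if st.2.2 then r.2 else st.2.1, false)

def dictionary_alt (lines : List String) : (List (List (String × String))) × List String :=
  let res := lines.foldl pvBLineStep ([], [], true)
  (res.1, res.2.1)

-- ===== PRECONDITION & SPEC =====
def Spec_dictionary (lines : List String) (out : (List (List (String × String))) × List String) : Prop := out = dictionary_alt lines
instance (lines : List String) (out : (List (List (String × String))) × List String) : Decidable (Spec_dictionary lines out) := by unfold Spec_dictionary; infer_instance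

-- ===== CLAIM (what is proved, stated in full; the proofs are below) =====
def Claim_equal_dictionary : Prop := ∀ (lines : List String), Dom_dictionary lines → Spec_dictionary lines (dictionary lines)

-- ===== LEMMAS AND PROOFS =====

-- proof-side reference loop: A's inner loop rephrased with an advancing cursor and fuel;
-- both A's fold (pv_main) and B's machine (pv_machine) are proved equal to it
def pvParseLoop (s : String) : Nat → Int → PySem.Dict String String → List String →
    PySem.Dict String String × List String
  | 0, _, d, ks => (d, ks)
  | fuel+1, k, d, ks =>
    let begin_ := PySem.Str.findFrom s ":" k
    if begin_ = -1 then (d, ks)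
    else
      let end_ := PySem.Str.findFrom s "," begin_
      let key := PySem.Str.stripChars (PySem.Str.stripChars (PySem.Str.slice s (some k) (some begin_)) ",") "\""
      let value := PySem.Str.stripChars (PySem.Str.stripChars (PySem.Str.stripChars (PySem.Str.stripChars (PySem.Str.stripChars (PySem.Str.stripChars (PySem.Str.slice s (some begin_) (some end_)) ":") "}") "\"") "]") "}") "\""
      pvParseLoop s fuel end_ (PySem.Dict.insert d key value) (ks ++ [key])

def pvParseRef (line : String) : PySem.Dict String String × List String :=
  let k0 := PySem.Str.find line "\""
  let s := line ++ ","
  let k : Int := if k0 = -1 then 0 else k0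
  pvParseLoop s (s.toList.length + 1) k PySem.Dict.empty []

theorem pv_toList_colon : (":" : String).toList = [':'] := rfl
theorem pv_toList_comma : ("," : String).toList = [','] := rfl

-- find(":", k) fails whenever no ':' occurs at or after position k
theorem pv_fail_of_not_mem (s : List Char) (kn : Nat) (h : ':' ∉ s.drop kn) :
    PySem.Chars.findFrom s [':'] (kn : Int) none = -1 := by
  by_cases hk : kn ≤ s.length
  · rw [PySem.Chars.findFrom_natCast_eq_neg_one_iff s [':'] kn hk]
    rw [List.singleton_infix_iff]
    exact h
  · simp only [PySem.Chars.findFrom]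
    push Not at hk
    have h1 : ¬ ((kn : Int) < 0) := by omega
    rw [if_neg h1]
    have hempty : List.drop (Int.toNat (kn:Int)) (List.take (Int.toNat ((s.length:Int))) s) = [] := by
      apply List.drop_eq_nil_of_le; simp; omega
    split_ifs with h2 h3
    · rfl
    · rfl
    · exfalso; rw [hempty] at h3; exact h3 rfl

-- find(":", -1) fails on a line ending in ','
theorem pv_fail_neg_one (t : List Char) :
    PySem.Chars.findFrom (t ++ [',']) [':'] (-1) none = -1 := by
  simp only [PySem.Chars.findFrom]
  have hlen : ((t ++ [',']).length : Int) = t.length + 1 := by simp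
  rw [hlen]
  have h1 : (-1 : Int) < 0 := by norm_num
  rw [if_pos h1]
  have h2 : ¬ ((-1 : Int) + (t.length + 1) < 0) := by omega
  rw [if_neg h2]
  have h3 : ¬ ((t.length : Int) + 1 < -1 + (t.length + 1)) := by omega
  rw [if_neg h3]
  have h4 : (-1 + ((t.length:Int) + 1)).toNat = t.length := by omega
  have h5 : (((t.length:Int) + 1)).toNat = t.length + 1 := by omega
  rw [h4, h5]
  have h6 : List.take (t.length + 1) (t ++ [',']) = t ++ [','] := by
    apply List.take_of_length_le; simp
  rw [h6, List.drop_left]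
  rfl

theorem pv_get_of_prefix (l : List Char) (n : Nat) (c : Char) (h : [c] <+: l.drop n) :
    l[n]? = some c := by
  obtain ⟨t, ht⟩ := h
  have h2 : (List.drop n l).head? = l[n]? := List.head?_drop
  rw [← ht] at h2
  simpa using h2.symm

theorem pv_prefix_of_get (l : List Char) (n : Nat) (c : Char) (h : l[n]? = some c) :
    [c] <+: l.drop n := by
  have h2 : (List.drop n l).head? = l[n]? := List.head?_drop
  rw [h] at h2
  cases hd : l.drop n with
  | nil => rw [hd] at h2; simp at h2
  | cons x xs =>
    rw [hd] at h2
    simp at h2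
    exact ⟨xs, by simp [h2]⟩

-- a successful find(":", k) yields positions b ≤ e with k < e and e inside the line
theorem pv_found (t l2 : List Char) (h2 : l2 = t ++ [',']) (kn : Nat)
    (hkn : kn ≤ l2.length) (hb : PySem.Chars.findFrom l2 [':'] (kn : Int) none ≠ -1) :
    ∃ (b e : Nat), PySem.Chars.findFrom l2 [':'] (kn : Int) none = (b : Int)
      ∧ PySem.Chars.findFrom l2 [','] (b : Int) none = (e : Int)
      ∧ kn < e ∧ e ≤ t.length := by
  obtain ⟨hle, hpre, -⟩ := PySem.Chars.findFrom_natCast_spec l2 [':'] kn hkn hb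
  set B := PySem.Chars.findFrom l2 [':'] (kn : Int) none with hBdef
  have hB0 : 0 ≤ B := le_trans (by omega) hle
  have hBn : B = ((B.toNat : Nat) : Int) := by omega
  have hcol : l2[B.toNat]? = some ':' := pv_get_of_prefix _ _ _ hpre
  have hBlt : B.toNat < l2.length := by
    by_contra hc
    rw [List.getElem?_eq_none (by omega)] at hcol
    simp at hcol
  have hBle : B.toNat ≤ t.length := by
    have : l2.length = t.length + 1 := by simp [h2]
    omega
  have hmem : ',' ∈ l2.drop B.toNat := by
    rw [h2, List.drop_append_of_le_length (by omega)]
    simp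
  have he : PySem.Chars.findFrom l2 [','] ((B.toNat : Nat) : Int) none ≠ -1 := by
    intro hcontra
    rw [PySem.Chars.findFrom_natCast_eq_neg_one_iff l2 [','] B.toNat (by omega)] at hcontra
    rw [List.singleton_infix_iff] at hcontra
    exact hcontra hmem
  obtain ⟨hle2, hpre2, -⟩ := PySem.Chars.findFrom_natCast_spec l2 [','] B.toNat (by omega) he
  set E := PySem.Chars.findFrom l2 [','] ((B.toNat : Nat) : Int) none with hEdef
  have hE0 : 0 ≤ E := le_trans (by omega) hle2
  have hcom : l2[E.toNat]? = some ',' := pv_get_of_prefix _ _ _ hpre2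
  have hElt : E.toNat < l2.length := by
    by_contra hc
    rw [List.getElem?_eq_none (by omega)] at hcom
    simp at hcom
  have hne : E.toNat ≠ B.toNat := by
    intro hEq
    rw [hEq, hcol] at hcom
    simp at hcom
  have hlen : l2.length = t.length + 1 := by simp [h2]
  refine ⟨B.toNat, E.toNat, by omega, ?_, by omega, by omega⟩
  rw [hBn] at hEdef
  omega

-- once find fails, A's remaining iterations only bump the cursor
theorem pv_fail_loop (line2 : String) (sctr : Int) (cs : List Char) :
    ∀ (kn : Nat) (d : PySem.Dict String String) (keys : List String),
      ':' ∉ line2.toList.drop kn →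
      cs.foldl (fun st2 _ => pvAStep line2 sctr st2) (d, keys, (kn : Int))
        = (d, keys, (kn : Int) + cs.length) := by
  induction cs with
  | nil => intro kn d keys _; simp
  | cons c cs ih =>
    intro kn d keys h
    have hfail : PySem.Str.findFrom line2 ":" ((kn : Nat) : Int) = -1 := by
      simp only [PySem.Str.findFrom_eq, pv_toList_colon]
      exact pv_fail_of_not_mem _ _ h
    have hstep : pvAStep line2 sctr (d, keys, (kn : Int)) = (d, keys, (kn : Int) + 1) := by
      simp only [pvAStep, hfail]
      simp
    have h' : ':' ∉ line2.toList.drop (kn + 1) := by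
      intro hmem
      apply h
      have : line2.toList.drop (kn + 1) = List.drop 1 (line2.toList.drop kn) := by
        rw [List.drop_drop]
      rw [this] at hmem
      exact List.mem_of_mem_drop hmem
    have hcast : ((kn : Int) + 1) = (((kn + 1 : Nat)) : Int) := by omega
    calc (c :: cs).foldl (fun st2 _ => pvAStep line2 sctr st2) (d, keys, (kn : Int))
        = cs.foldl (fun st2 _ => pvAStep line2 sctr st2) (d, keys, (((kn+1 : Nat)) : Int)) := by
          simp only [List.foldl_cons, hstep, hcast]
      _ = (d, keys, (((kn+1:Nat)) : Int) + cs.length) := ih (kn+1) d keys h'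
      _ = (d, keys, (kn : Int) + (c :: cs).length) := by
          simp only [Prod.mk.injEq, List.length_cons]
          exact ⟨trivial, trivial, by push_cast; ring⟩

-- the reference loop: the key accumulator is threaded by appending
theorem pv_loop_acc (s : String) :
    ∀ (fuel : Nat) (k : Int) (d : PySem.Dict String String) (ks : List String),
      pvParseLoop s fuel k d ks
        = ((pvParseLoop s fuel k d []).1, ks ++ (pvParseLoop s fuel k d []).2) := by
  intro fuel
  induction fuel with
  | zero => intro k d ks; simp [pvParseLoop]
  | succ fuel ih =>
    intro k d ks
    simp only [pvParseLoop]
    split_ifs with h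
    · simp
    · rw [ih _ _ (ks ++ _), ih _ _ ([] ++ _)]
      simp

-- A-SIDE MAIN: A's character-counted fold agrees with the reference cursor loop
theorem pv_main (t : List Char) (line2 : String) (h2 : line2.toList = t ++ [','])
    (sctr : Int) (cs : List Char) :
    ∀ (kn : Nat) (d : PySem.Dict String String) (keys : List String) (fuel : Nat),
      kn + 1 ≤ line2.toList.length →
      line2.toList.length ≤ kn + 1 + cs.length →
      line2.toList.length ≤ kn + fuel →
      (cs.foldl (fun st2 _ => pvAStep line2 sctr st2) (d, keys, (kn : Int))).1
          = (pvParseLoop line2 fuel (kn : Int) d []).1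
        ∧ (cs.foldl (fun st2 _ => pvAStep line2 sctr st2) (d, keys, (kn : Int))).2.1
          = keys ++ (if sctr = 0 then (pvParseLoop line2 fuel (kn : Int) d []).2 else []) := by
  induction cs with
  | nil =>
    intro kn d keys fuel hk hn hf
    simp only [List.foldl_nil, List.length_nil] at *
    have hkn : kn = t.length := by
      have : line2.toList.length = t.length + 1 := by rw [h2]; simp
      omega
    have hfail : PySem.Chars.findFrom line2.toList [':'] (kn : Int) none = -1 := by
      apply pv_fail_of_not_mem
      rw [h2, hkn, List.drop_left]
      simp
    obtain ⟨m, hm⟩ : ∃ m, fuel = m + 1 := by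
      have : line2.toList.length = t.length + 1 := by rw [h2]; simp
      exact ⟨fuel - 1, by omega⟩
    subst hm
    simp only [pvParseLoop]
    rw [if_pos (by simp only [PySem.Str.findFrom_eq, pv_toList_colon]; exact hfail)]
    constructor
    · rfl
    · simp
  | cons c cs ih =>
    intro kn d keys fuel hk hn hf
    by_cases hb : PySem.Chars.findFrom line2.toList [':'] (kn : Int) none = -1
    · -- fail: A no-ops to the end, the reference loop returns
      have hfail : PySem.Str.findFrom line2 ":" ((kn : Nat) : Int) = -1 := by
        simp only [PySem.Str.findFrom_eq, pv_toList_colon]; exact hb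
      have hnm : ':' ∉ line2.toList.drop kn := by
        rw [PySem.Chars.findFrom_natCast_eq_neg_one_iff line2.toList [':'] kn (by omega)] at hb
        rw [List.singleton_infix_iff] at hb
        exact hb
      rw [pv_fail_loop line2 sctr (c :: cs) kn d keys hnm]
      obtain ⟨m, hm⟩ : ∃ m, fuel = m + 1 := ⟨fuel - 1, by omega⟩
      subst hm
      simp only [pvParseLoop]
      rw [if_pos hfail]
      constructor
      · rfl
      · simp
    · -- found: one pair step on both sides
      obtain ⟨b, e, hbv, hev, hke, het⟩ := pv_found t line2.toList h2 kn (by omega) hb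
      have hlen : line2.toList.length = t.length + 1 := by rw [h2]; simp
      have hbS : PySem.Str.findFrom line2 ":" ((kn : Nat) : Int) = (b : Int) := by
        simp only [PySem.Str.findFrom_eq, pv_toList_colon]; exact hbv
      have heS : PySem.Str.findFrom line2 "," ((b : Nat) : Int) = (e : Int) := by
        simp only [PySem.Str.findFrom_eq, pv_toList_comma]; exact hev
      have hbne : ((b : Nat) : Int) ≠ -1 := by omega
      have hene : ((e : Nat) : Int) ≠ -1 := by omega
      obtain ⟨m, hm⟩ : ∃ m, fuel = m + 1 := ⟨fuel - 1, by omega⟩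
      subst hm
      set key := PySem.Str.stripChars (PySem.Str.stripChars (PySem.Str.slice line2 (some ((kn:Nat) : Int)) (some ((b : Nat) : Int))) ",") "\"" with hkey
      set value := PySem.Str.stripChars (PySem.Str.stripChars (PySem.Str.stripChars (PySem.Str.stripChars (PySem.Str.stripChars (PySem.Str.stripChars (PySem.Str.slice line2 (some ((b:Nat) : Int)) (some ((e : Nat) : Int))) ":") "}") "\"") "]") "}") "\"" with hvalue
      set d' := PySem.Dict.insert d key value with hd'
      have hstep : pvAStep line2 sctr (d, keys, ((kn:Nat) : Int))
          = (d', (if sctr = 0 then keys ++ [key] else keys), ((e : Nat) : Int)) := by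
        simp only [pvAStep, hbS, heS]
        rw [if_pos hbne, if_pos hene]
      have hBstep : pvParseLoop line2 (m+1) ((kn:Nat) : Int) d []
          = pvParseLoop line2 m ((e : Nat) : Int) d' ([] ++ [key]) := by
        simp only [pvParseLoop, hbS, heS]
        rw [if_neg hbne]
      obtain ⟨ih1, ih2⟩ := ih e d' (if sctr = 0 then keys ++ [key] else keys) m
        (by omega) (by simp at hn ⊢; omega) (by omega)
      constructor
      · rw [List.foldl_cons, hstep, ih1, hBstep,
            pv_loop_acc line2 m ((e : Nat) : Int) d' ([] ++ [key])]
      · rw [List.foldl_cons, hstep, ih2, hBstep,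
            pv_loop_acc line2 m ((e : Nat) : Int) d' ([] ++ [key])]
        by_cases hs : sctr = 0
        · simp [hs]
        · simp [hs]

-- A-SIDE per line: A's inner loop = pvParseRef
theorem pv_line (line : String) (sctr : Int) (keys : List String) :
    ((line ++ ",").toList.foldl (fun st2 _ => pvAStep (line ++ ",") sctr st2)
        ((PySem.Dict.empty : PySem.Dict String String), keys, PySem.Str.find line "\"")).1
        = (pvParseRef line).1
      ∧ ((line ++ ",").toList.foldl (fun st2 _ => pvAStep (line ++ ",") sctr st2)
        ((PySem.Dict.empty : PySem.Dict String String), keys, PySem.Str.find line "\"")).2.1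
        = keys ++ (if sctr = 0 then (pvParseRef line).2 else []) := by
  have h2 : (line ++ ",").toList = line.toList ++ [','] := by
    rw [String.toList_append]; rfl
  have hlen : (line ++ ",").toList.length = line.toList.length + 1 := by rw [h2]; simp
  by_cases h0 : PySem.Str.find line "\"" = -1
  · -- no quote: first iteration fails from -1, cursor becomes 0
    obtain ⟨c, cs, hcons⟩ : ∃ c cs, (line ++ ",").toList = c :: cs := by
      cases hh : (line ++ ",").toList with
      | nil => rw [hh] at hlen; simp at hlen
      | cons c cs => exact ⟨c, cs, rfl⟩
    have hcs : cs.length + 1 = (line ++ ",").toList.length := by rw [hcons]; simp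
    have hfail : PySem.Str.findFrom (line ++ ",") ":" (-1) = -1 := by
      simp only [PySem.Str.findFrom_eq, pv_toList_colon, h2]
      exact pv_fail_neg_one line.toList
    have hstep : pvAStep (line ++ ",") sctr (PySem.Dict.empty, keys, (-1 : Int))
        = (PySem.Dict.empty, keys, (0 : Int)) := by
      simp only [pvAStep, hfail]
      simp
    have hmain := pv_main line.toList (line ++ ",") h2 sctr cs 0 PySem.Dict.empty keys
      ((line ++ ",").toList.length + 1) (by omega) (by omega) (by omega)
    simp only [Nat.cast_zero] at hmain
    unfold pvParseRef
    simp only [h0, if_pos]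
    rw [hcons] at hmain ⊢
    rw [List.foldl_cons, hstep]
    simp only [List.length_cons] at hmain ⊢
    exact hmain
  · -- quote found at k0 ≥ 0
    have hch : PySem.Str.find line "\"" = PySem.Chars.find line.toList ("\"" : String).toList := by
      simp only [PySem.Str.find]
    have hge : 0 ≤ PySem.Str.find line "\"" := by
      have := PySem.Chars.neg_one_le_find (s := line.toList) (sub := ("\"" : String).toList)
      rw [hch]; omega
    set k0 := PySem.Str.find line "\"" with hk0
    have hk0n : k0 = ((k0.toNat : Nat) : Int) := by omega
    have hlt : k0.toNat < line.toList.length := by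
      have hs := PySem.Chars.find_spec (s := line.toList) (sub := ("\"" : String).toList)
        (by rw [← hch]; exact hge)
      obtain ⟨hpre, -⟩ := hs
      have hgt : line.toList[(PySem.Chars.find line.toList ("\"" : String).toList).toNat]? = some '"' :=
        pv_get_of_prefix _ _ _ hpre
      by_contra hc
      rw [List.getElem?_eq_none (by omega)] at hgt
      simp at hgt
    have hmain := pv_main line.toList (line ++ ",") h2 sctr (line ++ ",").toList k0.toNat
      PySem.Dict.empty keys ((line ++ ",").toList.length + 1) (by omega) (by omega) (by omega)
    unfold pvParseRef
    simp only [← hk0, h0]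
    rw [hk0n]
    exact hmain

-- A-SIDE outer loop, after the first line (s ≥ 1: keys are no longer collected)
theorem pv_outer (lines : List String) :
    ∀ (l : List (List (String × String))) (keys : List String) (sctr : Int), 1 ≤ sctr →
      lines.foldl pvALineStep (l, keys, sctr)
        = (l ++ (lines.map pvParseRef).map (fun p => p.1.items), keys, sctr + lines.length) := by
  induction lines with
  | nil => intro l keys sctr _; simp
  | cons line rest ih =>
    intro l keys sctr hs
    have hline := pv_line line sctr keys
    have hstep : pvALineStep (l, keys, sctr) line
        = (l ++ [(pvParseRef line).1.items], keys, sctr + 1) := by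
      simp only [pvALineStep]
      rw [hline.1, hline.2]
      rw [if_neg (by omega)]
      simp
    rw [List.foldl_cons, hstep, ih _ _ _ (by omega)]
    simp only [Prod.mk.injEq, List.map_cons, List.length_cons]
    refine ⟨by simp, by simp, by push_cast; ring⟩

-- ===== B-side lemmas: the state machine agrees with the reference loop =====

-- a first occurrence characterises findFrom
theorem pv_findFrom_first (s : List Char) (c : Char) (k b : Nat) (hkb : k ≤ b)
    (hks : k ≤ s.length)
    (hocc : [c] <+: s.drop b) (hmin : ∀ i, k ≤ i → i < b → ¬ [c] <+: s.drop i) :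
    PySem.Chars.findFrom s [c] (k : Int) none = (b : Int) := by
  have hinfix : [c] <:+: s.drop k := by
    have hdd : (s.drop k).drop (b - k) = s.drop b := by
      rw [List.drop_drop]; congr 1; omega
    have hsfx : (s.drop k).drop (b - k) <:+ s.drop k := List.drop_suffix _ _
    rw [hdd] at hsfx
    exact (List.IsPrefix.isInfix hocc).trans (List.IsSuffix.isInfix hsfx)
  have hne : PySem.Chars.findFrom s [c] (k : Int) none ≠ -1 := by
    intro hcon
    rw [PySem.Chars.findFrom_natCast_eq_neg_one_iff s [c] k hks] at hcon
    exact hcon hinfix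
  obtain ⟨hle, hpre, hminF⟩ := PySem.Chars.findFrom_natCast_spec s [c] k hks hne
  set F := PySem.Chars.findFrom s [c] (k : Int) none with hF
  have hF0 : 0 ≤ F := le_trans (by omega) hle
  have hFk : k ≤ F.toNat := by omega
  have heq : F.toNat = b := by
    rcases lt_trichotomy F.toNat b with h | h | h
    · exact absurd hpre (hmin F.toNat hFk h)
    · exact h
    · exact absurd hocc (hminF b (by omega) (by omega))
  omega

-- with no colon ahead, the machine in key mode never changes (d, ks)
theorem pv_noColon (rest : List Char) :
    ∀ (d : PySem.Dict String String) (ks : List String) (buf : List Char),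
      ':' ∉ rest →
      (rest.foldl pvBStep (d, ks, buf, none)).1 = d
        ∧ (rest.foldl pvBStep (d, ks, buf, none)).2.1 = ks := by
  intro d ks
  induction rest with
  | nil => intro buf _; exact ⟨rfl, rfl⟩
  | cons c cs ih =>
    intro buf h
    have hc : c ≠ ':' := fun hc => h (by simp [hc])
    have hcs : ':' ∉ cs := fun hm => h (by simp [hm])
    rw [List.foldl_cons]
    have hstep : pvBStep (d, ks, buf, none) c = (d, ks, buf ++ [c], none) := by
      simp [pvBStep, hc]
    rw [hstep]
    exact ih (buf ++ [c]) hcs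

-- key mode advances from j to the first colon b, then emits the stripped key
theorem pv_keyAdvance (s : List Char) (k b : Nat) (hb : b < s.length)
    (hsb : s[b]? = some ':') :
    ∀ (j : Nat) (d : PySem.Dict String String) (ks : List String),
      k ≤ j → j ≤ b → (∀ i, j ≤ i → i < b → s[i]? ≠ some ':') →
      (s.drop j).foldl pvBStep (d, ks, (s.drop k).take (j - k), none)
        = (s.drop (b + 1)).foldl pvBStep
            (d, ks, [':'], some (pvStripKey (String.ofList ((s.drop k).take (b - k))))) := by
  suffices h : ∀ (m j : Nat) (d : PySem.Dict String String) (ks : List String),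
      k ≤ j → j ≤ b → b - j = m → (∀ i, j ≤ i → i < b → s[i]? ≠ some ':') →
      (s.drop j).foldl pvBStep (d, ks, (s.drop k).take (j - k), none)
        = (s.drop (b + 1)).foldl pvBStep
            (d, ks, [':'], some (pvStripKey (String.ofList ((s.drop k).take (b - k))))) by
    intro j d ks hkj hjb hmin
    exact h (b - j) j d ks hkj hjb rfl hmin
  intro m
  induction m with
  | zero =>
    intro j d ks hkj hjb hm hmin
    have hj : j = b := by omega
    subst hj
    have hcons : s.drop j = ':' :: s.drop (j + 1) := by
      rw [List.drop_eq_getElem_cons hb]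
      have : s[j] = ':' := by
        have := List.getElem?_eq_getElem hb
        rw [this] at hsb; simpa using hsb
      rw [this]
    rw [hcons, List.foldl_cons]
    have hstep : pvBStep (d, ks, (s.drop k).take (j - k), none) ':'
        = (d, ks, [':'], some (pvStripKey (String.ofList ((s.drop k).take (j - k))))) := by
      simp [pvBStep]
    rw [hstep]
  | succ m ih =>
    intro j d ks hkj hjb hm hmin
    have hjb' : j < b := by omega
    have hjl : j < s.length := by omega
    have hcons : s.drop j = s[j] :: s.drop (j + 1) := List.drop_eq_getElem_cons hjl
    have hne : s[j] ≠ ':' := by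
      intro hc
      exact hmin j le_rfl hjb' (by rw [List.getElem?_eq_getElem hjl, hc])
    rw [hcons, List.foldl_cons]
    have hstep : pvBStep (d, ks, (s.drop k).take (j - k), none) s[j]
        = (d, ks, (s.drop k).take (j - k) ++ [s[j]], none) := by
      simp [pvBStep, hne]
    have hbuf : (s.drop k).take (j - k) ++ [s[j]] = (s.drop k).take (j + 1 - k) := by
      have h1 : j + 1 - k = (j - k) + 1 := by omega
      rw [h1, List.take_succ]
      have h2 : (s.drop k)[j - k]? = s[j]? := by
        rw [List.getElem?_drop]
        congr 1
        omega
      rw [h2, List.getElem?_eq_getElem hjl]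
      rfl
    rw [hstep, hbuf]
    exact ih (j + 1) d ks (by omega) (by omega) (by omega)
      (fun i hi1 hi2 => hmin i (by omega) hi2)

-- value mode advances from j to the first comma e, then emits the stripped value
theorem pv_valueMode (s : List Char) (b e : Nat) (hbe : b < e) (hel : e < s.length)
    (hse : s[e]? = some ',') (hnc : ∀ i, b ≤ i → i < e → s[i]? ≠ some ',') :
    ∀ (j : Nat) (d : PySem.Dict String String) (ks : List String) (key : String),
      b < j → j ≤ e →
      (s.drop j).foldl pvBStep (d, ks, (s.drop b).take (j - b), some key)
        = (s.drop (e + 1)).foldl pvBStep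
            (PySem.Dict.insert d key (pvStripValue (String.ofList ((s.drop b).take (e - b)))),
             ks ++ [key], [','], none) := by
  suffices h : ∀ (m j : Nat) (d : PySem.Dict String String) (ks : List String) (key : String),
      b < j → j ≤ e → e - j = m →
      (s.drop j).foldl pvBStep (d, ks, (s.drop b).take (j - b), some key)
        = (s.drop (e + 1)).foldl pvBStep
            (PySem.Dict.insert d key (pvStripValue (String.ofList ((s.drop b).take (e - b)))),
             ks ++ [key], [','], none) by
    intro j d ks key hbj hje
    exact h (e - j) j d ks key hbj hje rfl
  intro m
  induction m with
  | zero =>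
    intro j d ks key hbj hje hm
    have hj : j = e := by omega
    subst hj
    have hcons : s.drop j = ',' :: s.drop (j + 1) := by
      rw [List.drop_eq_getElem_cons hel]
      have : s[j] = ',' := by
        have := List.getElem?_eq_getElem hel
        rw [this] at hse; simpa using hse
      rw [this]
    rw [hcons, List.foldl_cons]
    have hstep : pvBStep (d, ks, (s.drop b).take (j - b), some key) ','
        = (PySem.Dict.insert d key (pvStripValue (String.ofList ((s.drop b).take (j - b)))),
           ks ++ [key], [','], none) := by
      simp [pvBStep]
    rw [hstep]
  | succ m ih =>
    intro j d ks key hbj hje hm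
    have hje' : j < e := by omega
    have hjl : j < s.length := by omega
    have hcons : s.drop j = s[j] :: s.drop (j + 1) := List.drop_eq_getElem_cons hjl
    have hne : s[j] ≠ ',' := by
      intro hc
      exact hnc j (by omega) hje' (by rw [List.getElem?_eq_getElem hjl, hc])
    rw [hcons, List.foldl_cons]
    have hstep : pvBStep (d, ks, (s.drop b).take (j - b), some key) s[j]
        = (d, ks, (s.drop b).take (j - b) ++ [s[j]], some key) := by
      simp [pvBStep, hne]
    have hbuf : (s.drop b).take (j - b) ++ [s[j]] = (s.drop b).take (j + 1 - b) := by
      have h1 : j + 1 - b = (j - b) + 1 := by omega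
      rw [h1, List.take_succ]
      have h2 : (s.drop b)[j - b]? = s[j]? := by
        rw [List.getElem?_drop]
        congr 1
        omega
      rw [h2, List.getElem?_eq_getElem hjl]
      rfl
    rw [hstep, hbuf]
    exact ih (j + 1) d ks key (by omega) (by omega) (by omega)

-- strings with equal character lists are equal
theorem pv_str_ext (a b : String) (h : a.toList = b.toList) : a = b := by
  have := congrArg String.ofList h
  simpa using this

-- B-SIDE MAIN: from a clean key-segment state, the machine equals the reference loop
theorem pv_machine (t : List Char) (line2 : String) (h2 : line2.toList = t ++ [',']) :
    ∀ (n j k : Nat) (d : PySem.Dict String String) (ks : List String) (fuel : Nat),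
      line2.toList.length - j ≤ n → k ≤ j → j ≤ line2.toList.length →
      ':' ∉ (line2.toList.drop k).take (j - k) →
      line2.toList.length ≤ k + fuel →
      ((line2.toList.drop j).foldl pvBStep (d, ks, (line2.toList.drop k).take (j - k), none)).1
          = (pvParseLoop line2 fuel (k : Int) d ks).1
        ∧ ((line2.toList.drop j).foldl pvBStep (d, ks, (line2.toList.drop k).take (j - k), none)).2.1
          = (pvParseLoop line2 fuel (k : Int) d ks).2 := by
  intro n
  induction n with
  | zero =>
    intro j k d ks fuel hn hkj hjl hnc hf
    have hj : j = line2.toList.length := by omega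
    have hdropj : line2.toList.drop j = [] := by
      apply List.drop_eq_nil_of_le; omega
    have hsplit : line2.toList.drop k
        = (line2.toList.drop k).take (j - k) ++ line2.toList.drop j := by
      conv_lhs => rw [← List.take_append_drop (j - k) (line2.toList.drop k)]
      congr 1
      rw [List.drop_drop]
      congr 1
      omega
    have hnm : ':' ∉ line2.toList.drop k := by
      rw [hsplit, hdropj]
      simpa using hnc
    have hfail : PySem.Str.findFrom line2 ":" ((k : Nat) : Int) = -1 := by
      simp only [PySem.Str.findFrom_eq, pv_toList_colon]
      exact pv_fail_of_not_mem _ _ hnm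
    have hloop : pvParseLoop line2 fuel ((k : Nat) : Int) d ks = (d, ks) := by
      cases fuel with
      | zero => rfl
      | succ m => simp only [pvParseLoop]; rw [if_pos hfail]
    rw [hdropj, hloop]
    exact ⟨rfl, rfl⟩
  | succ n ih =>
    intro j k d ks fuel hn hkj hjl hnc hf
    by_cases hmem : ':' ∈ line2.toList.drop j
    case neg =>
      have hsplit : line2.toList.drop k
          = (line2.toList.drop k).take (j - k) ++ line2.toList.drop j := by
        conv_lhs => rw [← List.take_append_drop (j - k) (line2.toList.drop k)]
        congr 1
        rw [List.drop_drop]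
        congr 1
        omega
      have hnm : ':' ∉ line2.toList.drop k := by
        rw [hsplit]
        intro hx
        rcases List.mem_append.mp hx with hx | hx
        · exact hnc hx
        · exact hmem hx
      have hfail : PySem.Str.findFrom line2 ":" ((k : Nat) : Int) = -1 := by
        simp only [PySem.Str.findFrom_eq, pv_toList_colon]
        exact pv_fail_of_not_mem _ _ hnm
      have hloop : pvParseLoop line2 fuel ((k : Nat) : Int) d ks = (d, ks) := by
        cases fuel with
        | zero => rfl
        | succ m => simp only [pvParseLoop]; rw [if_pos hfail]
      rw [hloop]
      exact pv_noColon _ d ks _ hmem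
    case pos =>
      set sl := line2.toList with hsl
      have hjlt : j < sl.length := by
        by_contra hc
        rw [List.drop_eq_nil_of_le (by omega)] at hmem
        simp at hmem
      -- first ':' at or after j
      have hF0 : 0 ≤ PySem.Chars.find (sl.drop j) [':'] := by
        rw [PySem.Chars.find_nonneg_iff]
        rw [List.singleton_infix_iff]
        exact hmem
      obtain ⟨hpreF, hminF⟩ := PySem.Chars.find_spec (s := sl.drop j) (sub := [':']) hF0
      set F := PySem.Chars.find (sl.drop j) [':'] with hFdef
      set b := j + F.toNat with hbdef
      have hdropb : (sl.drop j).drop F.toNat = sl.drop b := by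
        rw [List.drop_drop]
      have hoccb : [':'] <+: sl.drop b := by rw [← hdropb]; exact hpreF
      have hcolb : sl[b]? = some ':' := pv_get_of_prefix _ _ _ hoccb
      have hbl : b < sl.length := by
        by_contra hc
        rw [List.getElem?_eq_none (by omega)] at hcolb
        simp at hcolb
      have hminb : ∀ i, k ≤ i → i < b → ¬ [':'] <+: sl.drop i := by
        intro i hik hib hpre
        have hgi : sl[i]? = some ':' := pv_get_of_prefix _ _ _ hpre
        by_cases hij : i < j
        · apply hnc
          have h1 : ((sl.drop k).take (j - k))[i - k]? = some ':' := by
            rw [List.getElem?_take_of_lt (by omega), List.getElem?_drop]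
            rw [show k + (i - k) = i by omega]
            exact hgi
          exact List.mem_of_getElem? h1
        · have hji : j ≤ i := by omega
          have : (sl.drop j).drop (i - j) = sl.drop i := by
            rw [List.drop_drop]; congr 1; omega
          exact hminF (i - j) (by omega) (by rw [this]; exact hpre)
      have hbfind : PySem.Chars.findFrom sl [':'] ((k : Nat) : Int) none = (b : Int) :=
        pv_findFrom_first sl ':' k b (by omega) (by omega) hoccb hminb
      -- first ',' at or after b (the appended trailing comma guarantees one)
      have hlen2 : sl.length = t.length + 1 := by rw [h2]; simp
      have hcomlast : sl[t.length]? = some ',' := by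
        rw [h2]
        rw [List.getElem?_append_right (by omega)]
        simp
      have hmemc : ',' ∈ sl.drop b := by
        have h1 : (sl.drop b)[t.length - b]? = some ',' := by
          rw [List.getElem?_drop, show b + (t.length - b) = t.length by omega]
          exact hcomlast
        exact List.mem_of_getElem? h1
      have hG0 : 0 ≤ PySem.Chars.find (sl.drop b) [','] := by
        rw [PySem.Chars.find_nonneg_iff, List.singleton_infix_iff]
        exact hmemc
      obtain ⟨hpreG, hminG⟩ := PySem.Chars.find_spec (s := sl.drop b) (sub := [',']) hG0
      set G := PySem.Chars.find (sl.drop b) [','] with hGdef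
      set e := b + G.toNat with hedef
      have hdrope : (sl.drop b).drop G.toNat = sl.drop e := by
        rw [List.drop_drop]
      have hocce : [','] <+: sl.drop e := by rw [← hdrope]; exact hpreG
      have hcome : sl[e]? = some ',' := pv_get_of_prefix _ _ _ hocce
      have hel : e < sl.length := by
        by_contra hc
        rw [List.getElem?_eq_none (by omega)] at hcome
        simp at hcome
      have hbe : b < e := by
        rcases Nat.eq_zero_or_pos G.toNat with h0 | h0
        · exfalso
          have : sl[b]? = some ',' := by rw [hedef, h0, Nat.add_zero] at hcome; exact hcome
          rw [hcolb] at this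
          simp at this
        · omega
      have hmine : ∀ i, b ≤ i → i < e → ¬ [','] <+: sl.drop i := by
        intro i hib hie hpre
        have : (sl.drop b).drop (i - b) = sl.drop i := by
          rw [List.drop_drop]; congr 1; omega
        exact hminG (i - b) (by omega) (by rw [this]; exact hpre)
      have hefind : PySem.Chars.findFrom sl [','] ((b : Nat) : Int) none = (e : Int) :=
        pv_findFrom_first sl ',' b e (by omega) (by omega) hocce hmine
      -- unfold one step of the reference loop
      have hbS : PySem.Str.findFrom line2 ":" ((k : Nat) : Int) = (b : Int) := by
        simp only [PySem.Str.findFrom_eq, pv_toList_colon]; exact hbfind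
      have heS : PySem.Str.findFrom line2 "," ((b : Nat) : Int) = (e : Int) := by
        simp only [PySem.Str.findFrom_eq, pv_toList_comma]; exact hefind
      obtain ⟨fm, hfm⟩ : ∃ fm, fuel = fm + 1 := ⟨fuel - 1, by omega⟩
      subst hfm
      have hkeyStr : PySem.Str.slice line2 (some ((k : Nat) : Int)) (some ((b : Nat) : Int))
          = String.ofList ((sl.drop k).take (b - k)) := by
        apply pv_str_ext
        rw [PySem.Str.toList_slice]
        simp [PySem.List.slice_natCast]
        rfl
      have hvalStr : PySem.Str.slice line2 (some ((b : Nat) : Int)) (some ((e : Nat) : Int))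
          = String.ofList ((sl.drop b).take (e - b)) := by
        apply pv_str_ext
        rw [PySem.Str.toList_slice]
        simp [PySem.List.slice_natCast]
        rfl
      set keyB := pvStripKey (String.ofList ((sl.drop k).take (b - k))) with hkeyB
      set valB := pvStripValue (String.ofList ((sl.drop b).take (e - b))) with hvalB
      have hloop : pvParseLoop line2 (fm + 1) ((k : Nat) : Int) d ks
          = pvParseLoop line2 fm ((e : Nat) : Int) (PySem.Dict.insert d keyB valB) (ks ++ [keyB]) := by
        simp only [pvParseLoop, hbS, heS]
        rw [if_neg (by omega)]
        rw [hkeyStr, hvalStr]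
        rfl
      -- machine: advance through the key segment, the value segment, then recurse
      have hminKey : ∀ i, j ≤ i → i < b → sl[i]? ≠ some ':' := by
        intro i h1 h2' hgi
        exact hminb i (by omega) h2' (pv_prefix_of_get _ _ _ hgi)
      have hkadv := pv_keyAdvance sl k b hbl hcolb j d ks hkj (by omega) hminKey
      have hncComma : ∀ i, b ≤ i → i < e → sl[i]? ≠ some ',' := by
        intro i h1 h2' hgi
        exact hmine i h1 h2' (pv_prefix_of_get _ _ _ hgi)
      have hbufcolon : [':'] = (sl.drop b).take (b + 1 - b) := by
        rw [show b + 1 - b = 1 by omega]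
        rw [List.drop_eq_getElem_cons hbl]
        have : sl[b] = ':' := by
          have h5 := List.getElem?_eq_getElem hbl
          rw [h5] at hcolb; simpa using hcolb
        rw [this]
        rfl
      have hvadv := pv_valueMode sl b e hbe hel hcome hncComma (b + 1) d ks keyB
        (by omega) (by omega)
      have hbufcomma : [','] = (sl.drop e).take (e + 1 - e) := by
        rw [show e + 1 - e = 1 by omega]
        rw [List.drop_eq_getElem_cons hel]
        have : sl[e] = ',' := by
          have h5 := List.getElem?_eq_getElem hel
          rw [h5] at hcome; simpa using hcome
        rw [this]
        rfl
      have hih := ih (e + 1) e (PySem.Dict.insert d keyB valB) (ks ++ [keyB]) fm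
        (by omega) (by omega) (by omega)
        (by rw [← hbufcomma]; simp)
        (by omega)
      rw [hloop]
      rw [hkadv, ← hkeyB, hbufcolon, hvadv, ← hvalB, hbufcomma]
      exact hih

-- pvFindQuote returns 0 when no quote is present, else the index of the first quote
theorem pv_quote_go (cs : List Char) :
    ∀ (i : Nat),
      ('"' ∉ cs ∧ pvFindQuote cs i = 0)
        ∨ (∃ dlt, pvFindQuote cs i = i + dlt ∧ ['"'] <+: cs.drop dlt
            ∧ ∀ m, m < dlt → ¬ ['"'] <+: cs.drop m) := by
  induction cs with
  | nil => intro i; left; exact ⟨by simp, rfl⟩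
  | cons c cs ih =>
    intro i
    by_cases hc : c = '"'
    · right
      refine ⟨0, by simp [pvFindQuote, hc], ⟨cs, by simp [hc]⟩, fun m hm => absurd hm (by omega)⟩
    · rcases ih (i + 1) with ⟨hn, hv⟩ | ⟨dlt, hv, hpre, hmin⟩
      · left
        constructor
        · intro hm
          rcases List.mem_cons.mp hm with h | h
          · exact hc h.symm
          · exact hn h
        · simpa [pvFindQuote, hc] using hv
      · right
        refine ⟨dlt + 1, ?_, by simpa using hpre, ?_⟩
        · simp only [pvFindQuote, if_neg hc]
          rw [hv]; omega
        · intro m hm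
          cases m with
          | zero =>
            intro hp
            have := pv_get_of_prefix _ _ _ hp
            simp at this
            exact hc this
          | succ m =>
            intro hp
            exact hmin m (by omega) (by simpa using hp)

-- B-SIDE per line: pvParseLineB = pvParseRef
theorem pv_lineB (line : String) : pvParseLineB line = pvParseRef line := by
  have h2 : (line ++ ",").toList = line.toList ++ [','] := by
    rw [String.toList_append]; rfl
  have hlen : (line ++ ",").toList.length = line.toList.length + 1 := by rw [h2]; simp
  have hch : PySem.Str.find line "\"" = PySem.Chars.find line.toList ['"'] := by
    simp only [PySem.Str.find]; rfl
  rcases pv_quote_go line.toList 0 with ⟨hnm, hv⟩ | ⟨dlt, hv, hpre, hmin⟩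
  · -- no quote in the line: start = 0 and find = -1
    have hfind : PySem.Str.find line "\"" = -1 := by
      rw [hch, PySem.Chars.find_eq_neg_one_iff, List.singleton_infix_iff]
      exact hnm
    have hm := pv_machine line.toList (line ++ ",") h2 ((line ++ ",").toList.length) 0 0
      PySem.Dict.empty [] ((line ++ ",").toList.length + 1)
      (by omega) (by omega) (by omega) (by simp) (by omega)
    unfold pvParseLineB pvParseRef
    simp only [hfind, if_pos, hv]
    rw [Prod.ext_iff]
    simpa using hm
  · -- quote at index dlt: start = dlt = find
    have hq0 : pvFindQuote line.toList 0 = dlt := by rw [hv]; omega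
    have hgq : line.toList[dlt]? = some '"' := pv_get_of_prefix _ _ _ hpre
    have hdl : dlt < line.toList.length := by
      by_contra hc
      rw [List.getElem?_eq_none (by omega)] at hgq
      simp at hgq
    have hfind : PySem.Chars.findFrom line.toList ['"'] ((0 : Nat) : Int) none = (dlt : Int) :=
      pv_findFrom_first line.toList '"' 0 dlt (by omega) (by omega) hpre
        (fun i _ hi => hmin i hi)
    have hfind' : PySem.Str.find line "\"" = (dlt : Int) := by
      rw [hch, ← PySem.Chars.findFrom_zero]
      simpa using hfind
    have hne : PySem.Str.find line "\"" ≠ -1 := by rw [hfind']; omega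
    -- the key-segment buffer at j = k = dlt is empty; pad with the prefix identity
    have hm := pv_machine line.toList (line ++ ",") h2 ((line ++ ",").toList.length) dlt dlt
      PySem.Dict.empty [] ((line ++ ",").toList.length + 1)
      (by omega) (by omega) (by omega) (by simp) (by omega)
    unfold pvParseLineB pvParseRef
    rw [hq0]
    simp only [hfind', if_neg (by omega : ((dlt : Nat) : Int) ≠ -1)]
    rw [Prod.ext_iff]
    simpa using hm

-- B-SIDE outer loop after the first line (first = false: keys stay fixed)
theorem pv_outerB (lines : List String) :
    ∀ (acc : List (List (String × String))) (keys : List String),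
      lines.foldl pvBLineStep (acc, keys, false)
        = (acc ++ lines.map (fun l => (pvParseLineB l).1.items), keys, false) := by
  induction lines with
  | nil => intro acc keys; simp
  | cons line rest ih =>
    intro acc keys
    rw [List.foldl_cons]
    simp only [pvBLineStep]
    rw [ih]
    simp

-- ===== VERDICT (by name: the statement is the Claim_ definition above) =====
theorem dictionary_spec : Claim_equal_dictionary := by
  intro lines _
  unfold Spec_dictionary dictionary dictionary_alt
  cases lines with
  | nil => rfl
  | cons line rest =>
    have hline := pv_line line 0 []
    have hstepA : pvALineStep ([], [], 0) line
        = ([(pvParseRef line).1.items], (pvParseRef line).2, 1) := by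
      simp only [pvALineStep]
      rw [hline.1, hline.2]
      simp
    have hstepB : pvBLineStep ([], [], true) line
        = ([(pvParseLineB line).1.items], (pvParseLineB line).2, false) := by
      simp [pvBLineStep]
    rw [List.foldl_cons, hstepA, pv_outer rest _ _ 1 (by omega),
        List.foldl_cons, hstepB, pv_outerB rest _ _]
    simp [pv_lineB]
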